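-- pv_equiv track=rewrite | github.com/Freddsle/FedProt | FedProt/utils.py | get_analyzed_proteins
-- ===== SOURCE A (Python) =====
-- def get_analyzed_proteins(list_of_features_lists, only_shared_proteins=False):
--     """
--     Get proteins list for the analysis from list of proteins lists.
--     :param list_of_features_lists: list of proteins lists
--     :param only_shared_proteins: if True, return only shared proteins
--     :return: list of proteins
--     """
--     prot_names = list()
--
--     if only_shared_proteins:
--         prot_names = list_of_features_lists[0]
--         for features_list in list_of_features_lists:
--             prot_names = sorted(list(set(prot_names) & set(features_list)))
--     else:
--         # use union of all proteins, not only shared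
--         for features_list in list_of_features_lists:
--             if len(prot_names) == 0:
--                 prot_names =  sorted(set(features_list))
--             else:
--                 prot_names = sorted(list(set(prot_names) | set(features_list)))
--     return prot_names
-- ===== SOURCE B (Python) =====
-- def get_analyzed_proteins(list_of_features_lists, only_shared_proteins=False):
--     """Count, for each protein, in how many of the input lists it occurs;
--     the union is every counted protein, the intersection those counted
--     len(list_of_features_lists) times. One counting pass, one sort."""
--     counts = {}
--     for features_list in list_of_features_lists:
--         for p in dict.fromkeys(features_list):
--             counts[p] = counts.get(p, 0) + 1
--     if only_shared_proteins:
--         k = len(list_of_features_lists)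
--         return sorted(p for p, c in counts.items() if c == k)
--     return sorted(counts)
-- ===== Notes on version B (the rewrite author's own statement) =====
-- stated objective: alternative
-- what changed: B replaces A's repeated set-intersect/union-and-resort loop by a single occurrence-counting pass over all lists with one dict (union = counted proteins, intersection = proteins counted in every list) and one final sort.
import Mathlib
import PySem

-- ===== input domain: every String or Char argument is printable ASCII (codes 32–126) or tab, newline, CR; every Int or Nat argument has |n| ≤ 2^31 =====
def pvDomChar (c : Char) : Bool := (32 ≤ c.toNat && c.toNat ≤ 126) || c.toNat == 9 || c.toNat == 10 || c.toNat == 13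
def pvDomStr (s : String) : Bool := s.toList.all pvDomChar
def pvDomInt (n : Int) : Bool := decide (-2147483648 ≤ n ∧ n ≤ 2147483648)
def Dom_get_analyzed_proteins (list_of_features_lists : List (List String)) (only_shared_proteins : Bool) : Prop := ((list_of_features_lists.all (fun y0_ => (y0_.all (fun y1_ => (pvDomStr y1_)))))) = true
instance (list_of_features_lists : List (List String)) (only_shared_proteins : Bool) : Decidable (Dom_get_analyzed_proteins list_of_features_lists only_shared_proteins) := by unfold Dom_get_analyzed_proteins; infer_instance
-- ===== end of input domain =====

-- B replaces A's repeated set-intersect/union-and-resort loop by one occurrence-counting pass over all lists and one final sort; return-value equivalence on Pre_.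

-- ===== PORT A =====
-- Literal port of A; `list_of_features_lists[0]` raises IndexError on [], excluded by Pre_ (the headD default is never reached inside Pre_).
def get_analyzed_proteins (list_of_features_lists : List (List String)) (only_shared_proteins : Bool) : List String :=
  if only_shared_proteins then
    list_of_features_lists.foldl
      (fun prot_names features_list =>
        PySem.List.sorted
          (PySem.Set.inter (PySem.Set.ofList prot_names) (PySem.Set.ofList features_list))
          (fun x => x) false)
      (list_of_features_lists.headD [])
  else
    list_of_features_lists.foldl
      (fun prot_names features_list =>
        if prot_names.length = 0 then
          PySem.List.sorted (PySem.Set.ofList features_list) (fun x => x) false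
        else
          PySem.List.sorted
            (PySem.Set.union (PySem.Set.ofList prot_names) (PySem.Set.ofList features_list))
            (fun x => x) false)
      []

-- ===== PORT B =====
-- counts[p] = number of input lists containing p (dict.fromkeys = PySem.List.dedup dedups within a list)
def get_analyzed_proteins_alt (list_of_features_lists : List (List String)) (only_shared_proteins : Bool) : List String :=
  let counts : PySem.Dict String Int :=
    list_of_features_lists.foldl
      (fun counts features_list =>
        (PySem.List.dedup features_list).foldl
          (fun counts p => counts.insert p (counts.getD p 0 + 1)) counts)
      PySem.Dict.empty
  if only_shared_proteins then
    let k : Int := (list_of_features_lists.length : Int)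
    PySem.List.sorted
      ((counts.items.filter (fun pc => pc.2 == k)).map (fun pc => pc.1))
      (fun x => x) false
  else
    PySem.List.sorted counts.keys (fun x => x) false

-- ===== PRECONDITION & SPEC =====
-- Pre_ excludes only (only_shared_proteins = true, empty outer list), where A raises IndexError on list_of_features_lists[0].
def Pre_get_analyzed_proteins (list_of_features_lists : List (List String)) (only_shared_proteins : Bool) : Prop :=
  only_shared_proteins = true → list_of_features_lists ≠ []
instance (list_of_features_lists : List (List String)) (only_shared_proteins : Bool) : Decidable (Pre_get_analyzed_proteins list_of_features_lists only_shared_proteins) := by unfold Pre_get_analyzed_proteins; infer_instance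

def pvWitness_get_analyzed_proteins : List (List String) × Bool := ([["b", "a"], ["a", "c"]], true)

def Spec_get_analyzed_proteins (list_of_features_lists : List (List String)) (only_shared_proteins : Bool) (out : List String) : Prop := out = get_analyzed_proteins_alt list_of_features_lists only_shared_proteins
instance (list_of_features_lists : List (List String)) (only_shared_proteins : Bool) (out : List String) : Decidable (Spec_get_analyzed_proteins list_of_features_lists only_shared_proteins out) := by unfold Spec_get_analyzed_proteins; infer_instance

-- ===== CLAIM =====
def Claim_equal_get_analyzed_proteins : Prop := ∀ (list_of_features_lists : List (List String)) (only_shared_proteins : Bool), Dom_get_analyzed_proteins list_of_features_lists only_shared_proteins → Pre_get_analyzed_proteins list_of_features_lists only_shared_proteins → Spec_get_analyzed_proteins list_of_features_lists only_shared_proteins (get_analyzed_proteins list_of_features_lists only_shared_proteins)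
-- ===== LEMMAS AND PROOFS =====

-- sorted (no key) of two Nodup lists with the same members coincide
theorem pv_sorted_eq_of_mem_iff {xs ys : List String} (hx : xs.Nodup) (hy : ys.Nodup)
    (h : ∀ z, z ∈ xs ↔ z ∈ ys) :
    PySem.List.sorted xs (fun x => x) false = PySem.List.sorted ys (fun x => x) false :=
  PySem.List.sorted_eq_sorted_of_perm xs ys (fun x => x) (fun _ _ h => h)
    ((List.perm_ext_iff_of_nodup hx hy).2 h)

-- A's intersection loop equals the sort-once of a set-intersection fold
theorem pv_fold_inter (rest : List (List String)) :
    ∀ (sA sB : List String), sB.Nodup → (∀ z, z ∈ sA ↔ z ∈ sB) →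
    sA = PySem.List.sorted sB (fun x => x) false →
    rest.foldl (fun prot fl =>
        PySem.List.sorted (PySem.Set.inter (PySem.Set.ofList prot) (PySem.Set.ofList fl)) (fun x => x) false) sA
      = PySem.List.sorted
          (rest.foldl (fun s fl => PySem.Set.inter s (PySem.Set.ofList fl)) sB) (fun x => x) false := by
  induction rest with
  | nil => intro sA sB _ _ hsort; simpa using hsort
  | cons fl rest ih =>
      intro sA sB hnd hmem hsort
      simp only [List.foldl_cons]
      apply ih
      · exact PySem.Set.nodup_inter _ _ hnd
      · intro z
        simp [PySem.List.mem_sorted, PySem.Set.mem_inter, PySem.Set.mem_ofList, hmem z]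
      · apply pv_sorted_eq_of_mem_iff
        · exact PySem.Set.nodup_inter _ _ (PySem.Set.nodup_ofList sA)
        · exact PySem.Set.nodup_inter _ _ hnd
        · intro z
          simp [PySem.Set.mem_inter, PySem.Set.mem_ofList, hmem z]

-- A's union loop (with its empty-accumulator restart) equals the sort-once of a set-union fold
theorem pv_fold_union (rest : List (List String)) :
    ∀ (sA sB : List String), sB.Nodup → (∀ z, z ∈ sA ↔ z ∈ sB) →
    sA = PySem.List.sorted sB (fun x => x) false →
    rest.foldl (fun prot fl =>
        if prot.length = 0 then PySem.List.sorted (PySem.Set.ofList fl) (fun x => x) false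
        else PySem.List.sorted (PySem.Set.union (PySem.Set.ofList prot) (PySem.Set.ofList fl)) (fun x => x) false) sA
      = PySem.List.sorted
          (rest.foldl (fun s fl => PySem.Set.union s (PySem.Set.ofList fl)) sB) (fun x => x) false := by
  induction rest with
  | nil => intro sA sB _ _ hsort; simpa using hsort
  | cons fl rest ih =>
      intro sA sB hnd hmem hsort
      simp only [List.foldl_cons]
      by_cases hA : sA.length = 0
      · have hsAnil : sA = [] := List.length_eq_zero_iff.mp hA
        have hsBnil : sB = [] := by
          cases hB : sB with
          | nil => rfl
          | cons b bs =>
              exfalso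
              have : b ∈ sA := (hmem b).2 (by simp [hB])
              simp [hsAnil] at this
        rw [if_pos hA]
        apply ih
        · exact PySem.Set.nodup_union _ _ hnd
        · intro z
          simp [PySem.List.mem_sorted, PySem.Set.mem_union, PySem.Set.mem_ofList, hsBnil]
        · apply pv_sorted_eq_of_mem_iff
          · exact PySem.Set.nodup_ofList fl
          · exact PySem.Set.nodup_union _ _ hnd
          · intro z
            simp [PySem.Set.mem_union, PySem.Set.mem_ofList, hsBnil]
      · rw [if_neg hA]
        apply ih
        · exact PySem.Set.nodup_union _ _ hnd
        · intro z
          simp [PySem.List.mem_sorted, PySem.Set.mem_union, PySem.Set.mem_ofList, hmem z]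
        · apply pv_sorted_eq_of_mem_iff
          · exact PySem.Set.nodup_union _ _ (PySem.Set.nodup_ofList sA)
          · exact PySem.Set.nodup_union _ _ hnd
          · intro z
            simp [PySem.Set.mem_union, PySem.Set.mem_ofList, hmem z]

-- abbreviation for B's counting fold (proof-side only)
def pvCounts (L : List (List String)) (d : PySem.Dict String Int) : PySem.Dict String Int :=
  L.foldl
    (fun counts features_list =>
      (PySem.List.dedup features_list).foldl
        (fun counts p => counts.insert p (counts.getD p 0 + 1)) counts)
    d

theorem pv_counts_getD (L : List (List String)) :
    ∀ (d : PySem.Dict String Int) (p : String),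
      (pvCounts L d).getD p 0 = d.getD p 0 + (L.countP (fun fl => decide (p ∈ fl)) : Int) := by
  induction L with
  | nil => intro d p; simp [pvCounts]
  | cons fl rest ih =>
      intro d p
      simp only [pvCounts, List.foldl_cons] at *
      rw [ih, PySem.Dict.getD_foldl_insert_add_one, List.countP_cons]
      by_cases hp : p ∈ fl
      · have h1 : List.count p (PySem.List.dedup fl) = 1 :=
          List.count_eq_one_of_mem (PySem.List.nodup_dedup fl) ((PySem.List.mem_dedup fl p).2 hp)
        rw [h1]
        simp [hp]
        ring
      · have h1 : List.count p (PySem.List.dedup fl) = 0 :=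
          List.count_eq_zero_of_not_mem (fun h => hp ((PySem.List.mem_dedup fl p).1 h))
        rw [h1]
        simp [hp]

theorem pv_counts_nodup_keys (L : List (List String)) :
    ∀ (d : PySem.Dict String Int), d.keys.Nodup → (pvCounts L d).keys.Nodup := by
  induction L with
  | nil => intro d h; simpa [pvCounts] using h
  | cons fl rest ih =>
      intro d h
      simp only [pvCounts, List.foldl_cons] at *
      exact ih _ (PySem.Dict.nodup_keys_foldl_insert _ _ _ h)

theorem pv_counts_mem_keys (L : List (List String)) :
    ∀ (d : PySem.Dict String Int) (p : String),
      p ∈ (pvCounts L d).keys ↔ p ∈ d.keys ∨ ∃ fl ∈ L, p ∈ fl := by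
  induction L with
  | nil => intro d p; simp [pvCounts]
  | cons fl rest ih =>
      intro d p
      simp only [pvCounts, List.foldl_cons] at *
      rw [ih, PySem.Dict.keys_foldl_insert, PySem.Set.mem_update]
      simp
      tauto

-- B's filtered item list: membership and nodup
theorem pv_filtered_mem (L : List (List String)) (k : Int) (z : String) :
    z ∈ (((pvCounts L PySem.Dict.empty).items.filter (fun pc => pc.2 == k)).map (fun pc => pc.1)) ↔
      z ∈ (pvCounts L PySem.Dict.empty).keys ∧ (pvCounts L PySem.Dict.empty).getD z 0 = k := by
  have hnd : (pvCounts L PySem.Dict.empty).keys.Nodup :=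
    pv_counts_nodup_keys L _ (by simp [PySem.Dict.keys, PySem.Dict.empty])
  rw [PySem.Dict.items_eq_map_keys _ hnd 0]
  constructor
  · intro h
    rcases List.mem_map.1 h with ⟨pc, hpc, hz⟩
    rcases List.mem_filter.1 hpc with ⟨hmem, hk⟩
    rcases List.mem_map.1 hmem with ⟨q, hq, hqe⟩
    subst hz
    rw [← hqe] at hk ⊢
    simp at hk
    exact ⟨hq, hk⟩
  · intro ⟨hmem, hk⟩
    exact List.mem_map.2 ⟨(z, (pvCounts L PySem.Dict.empty).getD z 0),
      List.mem_filter.2 ⟨List.mem_map.2 ⟨z, hmem, rfl⟩, by simp [hk]⟩, rfl⟩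

theorem pv_filtered_nodup (L : List (List String)) (k : Int) :
    (((pvCounts L PySem.Dict.empty).items.filter (fun pc => pc.2 == k)).map (fun pc => pc.1)).Nodup := by
  have hnd : (pvCounts L PySem.Dict.empty).keys.Nodup :=
    pv_counts_nodup_keys L _ (by simp [PySem.Dict.keys, PySem.Dict.empty])
  have hsub : (((pvCounts L PySem.Dict.empty).items.filter (fun pc => pc.2 == k)).map (fun pc => pc.1)).Sublist
      ((pvCounts L PySem.Dict.empty).items.map (fun pc => pc.1)) :=
    List.Sublist.map _ List.filter_sublist
  exact List.Nodup.sublist hsub hnd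

-- membership of A's set folds
theorem pv_mem_foldl_union (L : List (List String)) :
    ∀ (s : PySem.Set String) (z : String),
      z ∈ L.foldl (fun s fl => PySem.Set.union s (PySem.Set.ofList fl)) s ↔ z ∈ s ∨ ∃ fl ∈ L, z ∈ fl := by
  induction L with
  | nil => intro s z; simp
  | cons fl rest ih =>
      intro s z
      simp only [List.foldl_cons]
      rw [ih]
      simp [PySem.Set.mem_union, PySem.Set.mem_ofList]
      tauto

theorem pv_nodup_foldl_union (L : List (List String)) :
    ∀ (s : PySem.Set String), List.Nodup s →
      (L.foldl (fun s fl => PySem.Set.union s (PySem.Set.ofList fl)) s).Nodup := by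
  induction L with
  | nil => intro s h; simpa using h
  | cons fl rest ih => intro s h; exact ih _ (PySem.Set.nodup_union _ _ h)

theorem pv_mem_foldl_inter (L : List (List String)) :
    ∀ (s : PySem.Set String) (z : String),
      z ∈ L.foldl (fun s fl => PySem.Set.inter s (PySem.Set.ofList fl)) s ↔ z ∈ s ∧ ∀ fl ∈ L, z ∈ fl := by
  induction L with
  | nil => intro s z; simp
  | cons fl rest ih =>
      intro s z
      simp only [List.foldl_cons]
      rw [ih]
      simp [PySem.Set.mem_inter, PySem.Set.mem_ofList]
      tauto

theorem pv_nodup_foldl_inter (L : List (List String)) :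
    ∀ (s : PySem.Set String), List.Nodup s →
      (L.foldl (fun s fl => PySem.Set.inter s (PySem.Set.ofList fl)) s).Nodup := by
  induction L with
  | nil => intro s h; simpa using h
  | cons fl rest ih => intro s h; exact ih _ (PySem.Set.nodup_inter _ _ h)

-- B's port written with the pvCounts abbreviation (definitional)
theorem pv_alt_eq (L : List (List String)) (shared : Bool) :
    get_analyzed_proteins_alt L shared =
      if shared then
        PySem.List.sorted
          (((pvCounts L PySem.Dict.empty).items.filter
              (fun pc => pc.2 == (L.length : Int))).map (fun pc => pc.1))
          (fun x => x) false
      else PySem.List.sorted (pvCounts L PySem.Dict.empty).keys (fun x => x) false := rfl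

-- ===== VERDICT =====
theorem get_analyzed_proteins_spec : Claim_equal_get_analyzed_proteins := by
  intro L shared _ hpre
  unfold Spec_get_analyzed_proteins get_analyzed_proteins
  rw [pv_alt_eq]
  have hndk : (pvCounts L PySem.Dict.empty).keys.Nodup :=
    pv_counts_nodup_keys L _ (by simp [PySem.Dict.keys_empty])
  cases shared with
  | false =>
      simp only [Bool.false_eq_true, if_false]
      rw [pv_fold_union L [] [] List.nodup_nil (by simp) (by simp [PySem.List.sorted])]
      apply pv_sorted_eq_of_mem_iff
      · exact pv_nodup_foldl_union L [] List.nodup_nil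
      · exact hndk
      · intro z
        rw [pv_mem_foldl_union, pv_counts_mem_keys]
        simp [PySem.Dict.keys_empty]
  | true =>
      simp only [if_true]
      cases hL : L with
      | nil => exact absurd hL (hpre rfl)
      | cons l0 rest =>
          simp only [List.headD_cons, List.foldl_cons]
          rw [pv_fold_inter rest
              (PySem.List.sorted (PySem.Set.inter (PySem.Set.ofList l0) (PySem.Set.ofList l0)) (fun x => x) false)
              (PySem.Set.ofList l0)
              (PySem.Set.nodup_ofList l0)
              (by intro z; simp [PySem.List.mem_sorted, PySem.Set.mem_inter, PySem.Set.mem_ofList])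
              (pv_sorted_eq_of_mem_iff
                (PySem.Set.nodup_inter _ _ (PySem.Set.nodup_ofList l0))
                (PySem.Set.nodup_ofList l0)
                (by intro z; simp [PySem.Set.mem_inter]))]
          apply pv_sorted_eq_of_mem_iff
          · exact pv_nodup_foldl_inter rest _ (PySem.Set.nodup_ofList l0)
          · exact pv_filtered_nodup (l0 :: rest) _
          · intro z
            rw [pv_mem_foldl_inter, pv_filtered_mem, pv_counts_mem_keys, pv_counts_getD,
                PySem.Dict.getD_empty, zero_add]
            simp only [PySem.Set.mem_ofList, PySem.Dict.keys_empty, List.not_mem_nil, false_or]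
            constructor
            · intro ⟨hz0, hall⟩
              refine ⟨⟨l0, by simp, hz0⟩, ?_⟩
              have hcnt : (l0 :: rest).countP (fun fl => decide (z ∈ fl)) = (l0 :: rest).length :=
                List.countP_eq_length.2 (by
                  intro fl hfl
                  rcases List.mem_cons.1 hfl with h | h
                  · subst h; simpa using hz0
                  · simpa using hall fl h)
              rw [hcnt]
            · intro ⟨_, hk⟩
              have hlen : (l0 :: rest).countP (fun fl => decide (z ∈ fl)) = (l0 :: rest).length := by
                exact_mod_cast hk
              have hall := List.countP_eq_length.1 hlen
              constructor
              · simpa using hall l0 (by simp)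
              · intro fl hfl; simpa using hall fl (List.mem_cons_of_mem _ hfl)
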